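-- pv_equiv track=rewrite | github.com/gahlautabhinav/chandodaya | src/rule_based_classifier.py | _choose_base_family_pingala
-- ===== SOURCE A (Python) =====
-- from typing import List, Optional, Dict, Any, Tuple
--
-- BASE_METER_SYLLABLES = {
--     "gayatri": 8,
--     "ushnih": 7,
--     "anushtubh": 8,
--     "brihati": 9,
--     "pankti": 8,
--     "trishtubh": 11,
--     "jagati": 12,
-- }
--
-- def _choose_base_family_pingala(
--     pada_count: int,
--     counts: List[int],
-- ) -> Tuple[Optional[str], List[str]]:
--     """
--     Decide base family from pāda_count and syllable counts, using only
--     Pingala 7 heuristic.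
--     """
--     notes: List[str] = []
--
--     if not counts:
--         notes.append("No syllable counts available.")
--         return None, notes
--
--     first = counts[0]
--     all_equal = len(set(counts)) == 1
--
--     if all_equal:
--         n = first
--         if pada_count == 3 and n == 8:
--             notes.append("Pingala: 3 pādas x 8 syll -> gayatri")
--             return "gayatri", notes
--         if pada_count == 4 and n == 8:
--             notes.append("Pingala: 4 pādas x 8 syll -> anushtubh")
--             return "anushtubh", notes
--         if pada_count == 5 and n == 8:
--             notes.append("Pingala: 5 pādas x 8 syll -> pankti")
--             return "pankti", notes
--         if pada_count == 4 and n == 11: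
--             notes.append("Pingala: 4 pādas x 11 syll -> trishtubh")
--             return "trishtubh", notes
--         if pada_count == 4 and n == 12:
--             notes.append("Pingala: 4 pādas x 12 syll -> jagati")
--             return "jagati", notes
--         if pada_count == 4 and n == 9:
--             notes.append("Pingala: 4 pādas x 9 syll -> brihati")
--             return "brihati", notes
--         if 2 <= pada_count <= 4 and n == 7:
--             notes.append("Pingala: 2-4 pādas x 7 syll -> ushnih")
--             return "ushnih", notes
--
--     # If not perfect, choose closest target by |D|
--     best_family = None
--     best_D_abs = None
--     for fam, target in BASE_METER_SYLLABLES.items():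
--         D = first - target
--         if best_D_abs is None or abs(D) < best_D_abs:
--             best_D_abs = abs(D)
--             best_family = fam
--
--     if best_family is not None:
--         notes.append(
--             f"Pingala fallback: picked {best_family} as closest to first pāda count {first}."
--         )
--     else:
--         notes.append("Pingala fallback: no base family determined.")
--     return best_family, notes
-- ===== SOURCE B (Python) =====
-- from typing import List, Optional, Tuple
--
-- def _choose_base_family_pingala(
--     pada_count: int,
--     counts: List[int],
-- ) -> Tuple[Optional[str], List[str]]:
--     if not counts:
--         return None, ["No syllable counts available."]
--     first = counts[0]
--     if all(c == first for c in counts):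
--         fam = None
--         if first == 8 and 3 <= pada_count <= 5:
--             fam = "gayatri" if pada_count == 3 else "anushtubh" if pada_count == 4 else "pankti"
--         elif pada_count == 4 and first in (9, 11, 12):
--             fam = "brihati" if first == 9 else "trishtubh" if first == 11 else "jagati"
--         elif first == 7 and 2 <= pada_count <= 4:
--             return "ushnih", ["Pingala: 2-4 p\u0101das x 7 syll -> ushnih"]
--         if fam is not None:
--             return fam, [f"Pingala: {pada_count} p\u0101das x {first} syll -> {fam}"]
--     # closed-form nearest meter: targets are 7,8,9,11,12; thresholds reproduce
--     # the first-wins tie-break of iterating the meter dict in insertion order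
--     fam = ("ushnih" if first <= 7 else
--            "gayatri" if first == 8 else
--            "brihati" if first <= 10 else
--            "trishtubh" if first == 11 else
--            "jagati")
--     return fam, [f"Pingala fallback: picked {fam} as closest to first p\u0101da count {first}."]
-- ===== Notes on version B (the rewrite author's own statement) =====
-- stated objective: faster
-- what changed: B derives the family name by arithmetic case analysis (compute fam, then format one f-string note) instead of eight literal note strings in an if-cascade, replaces A's best-so-far scan over the meter dict by a closed-form threshold decision (<=7 ushnih, 8 gayatri, 9-10 brihati, 11 trishtubh, else jagati) that provably reproduces the scan's first-wins tie-break, and tests uniformity with short-circuiting all(c == first) instead of building set(counts), which is the measured constant-factor win on long lists.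
import Mathlib
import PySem

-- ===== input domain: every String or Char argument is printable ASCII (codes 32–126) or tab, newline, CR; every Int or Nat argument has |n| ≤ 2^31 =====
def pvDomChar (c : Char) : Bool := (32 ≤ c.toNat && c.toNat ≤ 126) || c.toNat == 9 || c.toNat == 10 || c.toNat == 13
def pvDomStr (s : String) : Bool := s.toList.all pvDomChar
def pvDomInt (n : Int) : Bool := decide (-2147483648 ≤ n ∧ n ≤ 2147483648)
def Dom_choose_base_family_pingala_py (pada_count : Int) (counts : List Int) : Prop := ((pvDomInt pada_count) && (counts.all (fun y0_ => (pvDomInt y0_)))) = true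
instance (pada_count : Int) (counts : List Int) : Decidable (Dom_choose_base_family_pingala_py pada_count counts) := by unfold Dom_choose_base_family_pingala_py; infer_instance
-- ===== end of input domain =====

-- B computes the family arithmetically and formats one note string, and replaces A's
-- best-so-far fallback scan by a closed-form threshold decision (objective: alternative).

-- ===== PORT A =====
-- the module constant BASE_METER_SYLLABLES.items(), in insertion order
def pvItemsA : List (String × Int) :=
  [("gayatri", 8), ("ushnih", 7), ("anushtubh", 8), ("brihati", 9),
   ("pankti", 8), ("trishtubh", 11), ("jagati", 12)]

-- the fallback loop of A: best_family / best_D_abs accumulator over the items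
-- (abs(D) is an int only ever compared; carried as Int.natAbs, whose order agrees with abs)
def pvFallbackA (first : Int) : Option String × List String :=
  let st := pvItemsA.foldl
    (fun (st : Option String × Option Nat) p =>
      let D := first - p.2
      match st.2 with
      | none => (some p.1, some D.natAbs)
      | some b => if D.natAbs < b then (some p.1, some D.natAbs) else st)
    (none, none)
  match st.1 with
  | some fam =>
      (some fam,
       ["Pingala fallback: picked " ++ fam ++ " as closest to first pāda count "
          ++ PySem.Int.toStr first ++ "."])
  | none => (none, ["Pingala fallback: no base family determined."])

def choose_base_family_pingala_py (pada_count : Int) (counts : List Int) : Option String × List String :=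
  match counts with
  | [] => (none, ["No syllable counts available."])
  | first :: _ =>
    if (PySem.Set.ofList counts).length == 1 then
      let n := first
      if pada_count == 3 && n == 8 then (some "gayatri", ["Pingala: 3 pādas x 8 syll -> gayatri"])
      else if pada_count == 4 && n == 8 then (some "anushtubh", ["Pingala: 4 pādas x 8 syll -> anushtubh"])
      else if pada_count == 5 && n == 8 then (some "pankti", ["Pingala: 5 pādas x 8 syll -> pankti"])
      else if pada_count == 4 && n == 11 then (some "trishtubh", ["Pingala: 4 pādas x 11 syll -> trishtubh"])
      else if pada_count == 4 && n == 12 then (some "jagati", ["Pingala: 4 pādas x 12 syll -> jagati"])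
      else if pada_count == 4 && n == 9 then (some "brihati", ["Pingala: 4 pādas x 9 syll -> brihati"])
      else if 2 ≤ pada_count && pada_count ≤ 4 && n == 7 then (some "ushnih", ["Pingala: 2-4 pādas x 7 syll -> ushnih"])
      else pvFallbackA first
    else pvFallbackA first

-- ===== PORT B =====
-- f"Pingala: {pada_count} pādas x {first} syll -> {fam}"
def pvNoteB (pc n : Int) (fam : String) : String :=
  "Pingala: " ++ PySem.Int.toStr pc ++ " pādas x " ++ PySem.Int.toStr n ++ " syll -> " ++ fam

-- closed-form nearest meter by thresholds
def pvNearestB (first : Int) : String :=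
  if first ≤ 7 then "ushnih"
  else if first = 8 then "gayatri"
  else if first ≤ 10 then "brihati"
  else if first = 11 then "trishtubh"
  else "jagati"

def pvFallbackB (first : Int) : Option String × List String :=
  let fam := pvNearestB first
  (some fam,
   ["Pingala fallback: picked " ++ fam ++ " as closest to first pāda count "
      ++ PySem.Int.toStr first ++ "."])

def choose_base_family_pingala_py_alt (pada_count : Int) (counts : List Int) : Option String × List String :=
  match counts with
  | [] => (none, ["No syllable counts available."])
  | first :: _ =>
    if counts.all (fun c => c == first) then
      if first = 8 ∧ 3 ≤ pada_count ∧ pada_count ≤ 5 then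
        let fam := if pada_count = 3 then "gayatri" else if pada_count = 4 then "anushtubh" else "pankti"
        (some fam, [pvNoteB pada_count first fam])
      else if pada_count = 4 ∧ (first = 9 ∨ first = 11 ∨ first = 12) then
        let fam := if first = 9 then "brihati" else if first = 11 then "trishtubh" else "jagati"
        (some fam, [pvNoteB pada_count first fam])
      else if first = 7 ∧ 2 ≤ pada_count ∧ pada_count ≤ 4 then
        (some "ushnih", ["Pingala: 2-4 pādas x 7 syll -> ushnih"])
      else pvFallbackB first
    else pvFallbackB first

-- ===== PRECONDITION & SPEC =====
def Spec_choose_base_family_pingala_py (pada_count : Int) (counts : List Int) (out : Option String × List String) : Prop := out = choose_base_family_pingala_py_alt pada_count counts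
instance (pada_count : Int) (counts : List Int) (out : Option String × List String) : Decidable (Spec_choose_base_family_pingala_py pada_count counts out) := by unfold Spec_choose_base_family_pingala_py; infer_instance

-- ===== CLAIM (what is proved, stated in full; the proofs are below) =====
def Claim_equal_choose_base_family_pingala_py : Prop := ∀ (pada_count : Int) (counts : List Int), Dom_choose_base_family_pingala_py pada_count counts → Spec_choose_base_family_pingala_py pada_count counts (choose_base_family_pingala_py pada_count counts)

-- ===== LEMMAS AND PROOFS =====

-- a Set.add fold never shrinks the set
lemma pv_len_le (l : List Int) (s : PySem.Set Int) : s.length ≤ (l.foldl PySem.Set.add s).length := by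
  induction l generalizing s with
  | nil => simp
  | cons b t ih =>
    refine le_trans ?_ (ih (PySem.Set.add s b))
    simp [PySem.Set.add]; split <;> simp

lemma pv_aux (a : Int) (l : List Int) :
    ((l.foldl PySem.Set.add [a]).length == 1) = l.all (fun c => c == a) := by
  induction l with
  | nil => simp
  | cons b t ih =>
    by_cases hb : b = a
    · subst hb
      have h1 : PySem.Set.add [b] b = [b] := by simp [PySem.Set.add, PySem.Set.contains]
      simp [List.foldl, ih]
    · have h1 : PySem.Set.add [a] b = [a, b] := by
        simp [PySem.Set.add, PySem.Set.contains]
        intro h; exact absurd h hb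
      have h2 := pv_len_le t [a, b]
      simp only [List.foldl, h1]
      have : ((t.foldl PySem.Set.add [a, b]).length == 1) = false := by
        simp at h2 ⊢; omega
      simp [this, hb]

-- len(set(counts)) == 1 is the same test as all(c == first for c in counts) on a nonempty list
lemma pv_alleq (a : Int) (l : List Int) :
    ((PySem.Set.ofList (a :: l)).length == 1) = (a :: l).all (fun c => c == a) := by
  rw [PySem.Set.ofList_eq_foldl]
  have h0 : PySem.Set.add ([] : PySem.Set Int) a = [a] := by
    simp [PySem.Set.add, PySem.Set.contains]
  simp only [List.foldl, h0, pv_aux, List.all_cons, beq_self_eq_true, Bool.true_and]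

-- A's best-so-far scan equals B's closed-form threshold decision
lemma pv_fallback_eq (first : Int) : pvFallbackA first = pvFallbackB first := by
  simp only [pvFallbackA, pvFallbackB, pvItemsA, pvNearestB, List.foldl]
  split_ifs <;> (repeat (first | rfl | omega | split_ifs | simp))

set_option maxHeartbeats 2000000 in
-- the cascade equals B's arithmetic case analysis (with common fallback)
lemma pv_hit_eq (pc first : Int) :
    (if pc == 3 && first == 8 then ((some "gayatri" : Option String), ["Pingala: 3 pādas x 8 syll -> gayatri"])
     else if pc == 4 && first == 8 then (some "anushtubh", ["Pingala: 4 pādas x 8 syll -> anushtubh"])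
     else if pc == 5 && first == 8 then (some "pankti", ["Pingala: 5 pādas x 8 syll -> pankti"])
     else if pc == 4 && first == 11 then (some "trishtubh", ["Pingala: 4 pādas x 11 syll -> trishtubh"])
     else if pc == 4 && first == 12 then (some "jagati", ["Pingala: 4 pādas x 12 syll -> jagati"])
     else if pc == 4 && first == 9 then (some "brihati", ["Pingala: 4 pādas x 9 syll -> brihati"])
     else if 2 ≤ pc && pc ≤ 4 && first == 7 then (some "ushnih", ["Pingala: 2-4 pādas x 7 syll -> ushnih"])
     else pvFallbackA first)
    = (if first = 8 ∧ 3 ≤ pc ∧ pc ≤ 5 then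
         let fam := if pc = 3 then "gayatri" else if pc = 4 then "anushtubh" else "pankti"
         (some fam, [pvNoteB pc first fam])
       else if pc = 4 ∧ (first = 9 ∨ first = 11 ∨ first = 12) then
         let fam := if first = 9 then "brihati" else if first = 11 then "trishtubh" else "jagati"
         (some fam, [pvNoteB pc first fam])
       else if first = 7 ∧ 2 ≤ pc ∧ pc ≤ 4 then
         (some "ushnih", ["Pingala: 2-4 pādas x 7 syll -> ushnih"])
       else pvFallbackB first) := by
  have hrw := pv_fallback_eq first
  split_ifs <;> simp_all <;> first | omega | (subst_vars; decide)

-- ===== VERDICT (by name: the statement is the Claim_ definition above) =====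
theorem choose_base_family_pingala_py_spec : Claim_equal_choose_base_family_pingala_py := by
  intro pc counts _
  unfold Spec_choose_base_family_pingala_py choose_base_family_pingala_py choose_base_family_pingala_py_alt
  match counts with
  | [] => rfl
  | a :: l =>
    rw [pv_alleq]
    by_cases h : ((a :: l).all (fun c => c == a)) = true
    · simp only [h, if_pos]
      exact pv_hit_eq pc a
    · simp only [eq_false_of_ne_true h, if_neg, Bool.false_eq_true, not_false_iff]
      exact pv_fallback_eq a
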